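-- pv_equiv track=rewrite | github.com/RadoSo/University | wdppython/l3/zad1.py | sevens
-- ===== SOURCE A (Python) =====
-- def sevens(liczba, rq):
--     count = 0
--     for i in str(liczba):
--         count+=1
--         if i != "7":
--             count = 0
--         if count >= rq:
--              return True
--     return False
-- ===== SOURCE B (Python) =====
-- def sevens(liczba, rq):
--     s = str(liczba)
--     return rq <= len(s) and "7" * rq in s
-- ===== Notes on version B (the rewrite author's own statement) =====
-- stated objective: idiomatic
-- what changed: Replaces A's manual run-length scan with a running counter and early return by one substring-containment test 'rq <= len(s) and "7"*rq in s'; '7'*rq is empty for rq<=0, which 'in' reports as present, matching A's immediate-True behaviour, and the length guard short-circuits targets longer than the string.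
import Mathlib
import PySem

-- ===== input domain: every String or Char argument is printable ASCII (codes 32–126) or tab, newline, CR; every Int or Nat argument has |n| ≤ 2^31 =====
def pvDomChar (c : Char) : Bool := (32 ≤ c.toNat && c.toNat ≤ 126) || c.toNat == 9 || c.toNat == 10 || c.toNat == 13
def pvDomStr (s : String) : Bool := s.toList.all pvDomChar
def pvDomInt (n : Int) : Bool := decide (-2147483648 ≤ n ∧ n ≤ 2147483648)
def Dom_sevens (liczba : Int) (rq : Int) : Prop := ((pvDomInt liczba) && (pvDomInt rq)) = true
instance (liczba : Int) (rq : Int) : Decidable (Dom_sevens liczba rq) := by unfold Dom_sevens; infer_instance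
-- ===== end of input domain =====

-- B replaces A's manual run-length scan by one substring-containment test:
-- rq <= len(str(liczba)) and '7'*rq in str(liczba)  (idiomatic; same behaviour, including rq ≤ 0).

-- ===== PORT A =====
-- the for-loop over str(liczba) with the running counter and the early 'return True'
def sevensLoop (rq : Int) : List Char → Int → Bool
  | [], _ => false
  | c :: rest, count =>
    let count1 := count + 1
    let count2 := if c ≠ '7' then 0 else count1
    if count2 ≥ rq then true else sevensLoop rq rest count2

def sevens (liczba : Int) (rq : Int) : Bool :=
  sevensLoop rq (PySem.Int.toChars liczba) 0

-- ===== PORT B =====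
-- s = str(liczba); return rq <= len(s) and "7" * rq in s   (the 'if' is Python's short-circuit 'and')
def sevens_alt (liczba : Int) (rq : Int) : Bool :=
  let s := PySem.Int.toChars liczba
  if rq ≤ (s.length : Int) then PySem.Chars.isIn (PySem.List.pyRepeat ['7'] rq) s else false

-- ===== PRECONDITION & SPEC =====
def Spec_sevens (liczba : Int) (rq : Int) (out : Bool) : Prop := out = sevens_alt liczba rq
instance (liczba : Int) (rq : Int) (out : Bool) : Decidable (Spec_sevens liczba rq out) := by unfold Spec_sevens; infer_instance

-- ===== CLAIM (what is proved, stated in full; the proofs are below) =====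
def Claim_equal_sevens : Prop := ∀ (liczba : Int) (rq : Int), Dom_sevens liczba rq → Spec_sevens liczba rq (sevens liczba rq)

-- ===== LEMMAS AND PROOFS =====

theorem tdc_len (b : Nat) (f : Nat) (n : Nat) (l : List Char) :
    l.length ≤ (Nat.toDigitsCore b f n l).length := by
  induction f generalizing n l with
  | zero => simp [Nat.toDigitsCore]
  | succ f ih =>
    simp only [Nat.toDigitsCore]
    split
    · simp
    · exact le_trans (by simp) (ih _ _)

theorem toDigits_ne_nil (n : Nat) : Nat.toDigits 10 n ≠ [] := by
  unfold Nat.toDigits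
  intro h
  simp only [Nat.toDigitsCore] at h
  split at h
  · simp at h
  · have := tdc_len 10 n (n / 10) [(n % 10).digitChar]
    rw [h] at this
    simp at this

theorem toChars_ne_nil (n : Int) : PySem.Int.toChars n ≠ [] := by
  unfold PySem.Int.toChars
  split
  · simp
  · exact toDigits_ne_nil _

theorem rep_prefix_rep (a : Char) {m n : Nat} (h : m ≤ n) :
    List.replicate m a <+: List.replicate n a :=
  ⟨List.replicate (n - m) a, by rw [← List.replicate_add]; congr 1; omega⟩

theorem rep_succ_prefix_cons (a c : Char) (n : Nat) (l : List Char) :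
    (List.replicate (n+1) a <+: c :: l) ↔ (a = c ∧ List.replicate n a <+: l) := by
  simp [List.replicate_succ, List.cons_prefix_cons]

-- characterisation of A's loop: with a carry of `count` leading sevens already seen, it returns
-- true iff rq ≤ 0 and the string is nonempty, or the carry is completed by a prefix run, or a
-- full run of rq sevens occurs somewhere
theorem loop_iff (rq : Int) (s : List Char) : ∀ (count : Int), 0 ≤ count →
    (sevensLoop rq s count = true ↔
      (s ≠ [] ∧ rq ≤ 0) ∨ List.replicate (max (rq - count) 1).toNat '7' <+: s ∨
      (1 ≤ rq ∧ List.replicate rq.toNat '7' <:+: s)) := by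
  induction s with
  | nil =>
    intro count hc
    simp only [sevensLoop, Bool.false_eq_true, false_iff]
    rintro (⟨h, _⟩ | h | ⟨h1, h2⟩)
    · exact h rfl
    · have := h.length_le
      simp at this
    · have := h2.length_le
      simp at this
      omega
  | cons c rest ih =>
    intro count hc
    simp only [sevensLoop]
    by_cases hrq : rq ≤ 0
    · have h2 : (if c ≠ '7' then 0 else count + 1) ≥ rq := by split <;> omega
      simp only [ge_iff_le, h2, if_pos, true_iff]
      exact Or.inl ⟨by simp, hrq⟩
    · have hrq1 : 1 ≤ rq := by omega
      by_cases h7 : c = '7'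
      · subst h7
        simp only [ne_eq, not_true_eq_false, if_false]
        by_cases hle : count + 1 ≥ rq
        · simp only [ge_iff_le, hle, if_pos, true_iff]
          refine Or.inr (Or.inl ?_)
          have : (max (rq - count) 1).toNat = 1 := by omega
          rw [this]
          exact (rep_succ_prefix_cons '7' '7' 0 rest).mpr ⟨rfl, by simp⟩
        · rw [if_neg hle, ih (count + 1) (by omega)]
          constructor
          · rintro (⟨_, h⟩ | h | ⟨_, h⟩)
            · omega
            · refine Or.inr (Or.inl ?_)
              have he : (max (rq - count) 1).toNat = (max (rq - (count+1)) 1).toNat + 1 := by omega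
              rw [he, rep_succ_prefix_cons]
              exact ⟨rfl, h⟩
            · exact Or.inr (Or.inr ⟨hrq1, h.trans (List.suffix_cons '7' rest).isInfix⟩)
          · rintro (⟨_, h⟩ | h | ⟨_, h⟩)
            · omega
            · refine Or.inr (Or.inl ?_)
              have he : (max (rq - count) 1).toNat = (max (rq - (count+1)) 1).toNat + 1 := by omega
              rw [he, rep_succ_prefix_cons] at h
              exact h.2
            · rcases (List.infix_cons_iff).mp h with hpre | hinf
              · refine Or.inr (Or.inl ?_)
                have he : rq.toNat = (rq.toNat - 1) + 1 := by omega
                rw [he, rep_succ_prefix_cons] at hpre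
                exact ((rep_prefix_rep '7'
                  (show (max (rq - (count+1)) 1).toNat ≤ rq.toNat - 1 by omega)).trans hpre.2)
              · exact Or.inr (Or.inr ⟨hrq1, hinf⟩)
      · simp only [ne_eq, h7, not_false_eq_true, if_true]
        rw [if_neg (by omega), ih 0 le_rfl]
        constructor
        · rintro (⟨_, h⟩ | h | ⟨_, h⟩)
          · omega
          · refine Or.inr (Or.inr ⟨hrq1, ?_⟩)
            have he : (max (rq - 0) 1).toNat = rq.toNat := by omega
            rw [he] at h
            exact h.isInfix.trans (List.suffix_cons c rest).isInfix
          · exact Or.inr (Or.inr ⟨hrq1, h.trans (List.suffix_cons c rest).isInfix⟩)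
        · rintro (⟨_, h⟩ | h | ⟨_, h⟩)
          · omega
          · exfalso
            have he : (max (rq - count) 1).toNat = ((max (rq - count) 1).toNat - 1) + 1 := by omega
            rw [he, rep_succ_prefix_cons] at h
            exact h7 h.1.symm
          · rcases (List.infix_cons_iff).mp h with hpre | hinf
            · exfalso
              have he : rq.toNat = (rq.toNat - 1) + 1 := by omega
              rw [he, rep_succ_prefix_cons] at hpre
              exact h7 hpre.1.symm
            · exact Or.inr (Or.inr ⟨hrq1, hinf⟩)

theorem sevens_eq_alt (liczba rq : Int) : sevens liczba rq = sevens_alt liczba rq := by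
  have hne : PySem.Int.toChars liczba ≠ [] := toChars_ne_nil liczba
  unfold sevens sevens_alt
  by_cases hlen : rq ≤ ((PySem.Int.toChars liczba).length : Int)
  case neg =>
    simp only [hlen, if_false]
    rw [Bool.eq_iff_iff, loop_iff rq (PySem.Int.toChars liczba) 0 le_rfl]
    simp only [Bool.false_eq_true, iff_false]
    rintro (⟨_, h⟩ | h | ⟨h1, h2⟩)
    · omega
    · have := h.length_le
      simp at this
      omega
    · have := h2.length_le
      simp at this
      omega
  simp only [hlen, if_pos]
  rw [PySem.List.pyRepeat_singleton, Bool.eq_iff_iff,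
    loop_iff rq (PySem.Int.toChars liczba) 0 le_rfl, PySem.Chars.isIn_iff_infix]
  by_cases hrq : rq ≤ 0
  · have h0 : rq.toNat = 0 := by omega
    rw [h0]
    simp only [List.replicate_zero]
    constructor
    · intro _; exact List.nil_infix
    · intro _; exact Or.inl ⟨hne, hrq⟩
  · have hrq1 : 1 ≤ rq := by omega
    constructor
    · rintro (⟨_, h⟩ | h | ⟨_, h⟩)
      · omega
      · have he : (max (rq - 0) 1).toNat = rq.toNat := by omega
        rw [he] at h
        exact h.isInfix
      · exact h
    · intro h
      exact Or.inr (Or.inr ⟨hrq1, h⟩)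

-- ===== VERDICT (by name: the statement is the Claim_ definition above) =====
theorem sevens_spec : Claim_equal_sevens := by
  intro liczba rq _
  unfold Spec_sevens
  exact sevens_eq_alt liczba rq
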